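-- pv_equiv track=rewrite | github.com/bodo-ai/Bodo | bodo/tests/iceberg_database_helpers/schema_evolution_tables.py | gen_combo_tables
-- ===== SOURCE A (Python) =====
-- from itertools import chain, combinations
--
-- def gen_combo_tables(input_table: str) -> dict[str, str]:
--     funcs = ["PROMOTE", "RENAME", "NULLABLE", "REORDER", "ADD", "DROP"]
--     # Possible combinations of functions where drop isn't an operation or is the last operation
--     combos = list(
--         chain.from_iterable(combinations(funcs, r) for r in range(1, len(funcs) + 1))
--     )
--     tables = {
--         f"{'_'.join(combo)}_TABLE": input_table
--         for combo in combos
--         if "DROP" not in combo[:-1]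
--     }
--     return tables
-- ===== SOURCE B (Python) =====
-- def gen_combo_tables(input_table: str) -> dict[str, str]:
--     funcs = ["PROMOTE", "RENAME", "NULLABLE", "REORDER", "ADD", "DROP"]
--     tables = {}
--     # BFS over the combination tree: level r holds all r-element combos in
--     # lexicographic index order, each paired with the index of its last element;
--     # the next level extends every combo by each strictly later element.
--     level = [((f,), i) for i, f in enumerate(funcs)]
--     while level:
--         for combo, _last in level:
--             if "DROP" not in combo[:-1]:
--                 tables["_".join(combo) + "_TABLE"] = input_table
--         level = [(combo + (funcs[j],), j)
--                  for combo, last in level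
--                  for j in range(last + 1, len(funcs))]
--     return tables
-- ===== Notes on version B (the rewrite author's own statement) =====
-- stated objective: alternative
-- what changed: Replaces the per-size itertools.combinations enumeration with a level-by-level BFS over the combination tree: start from singletons and repeatedly extend each combo by every strictly later element, inserting each level's keys as it is produced (no itertools, no precomputed combo list).
import Mathlib
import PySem

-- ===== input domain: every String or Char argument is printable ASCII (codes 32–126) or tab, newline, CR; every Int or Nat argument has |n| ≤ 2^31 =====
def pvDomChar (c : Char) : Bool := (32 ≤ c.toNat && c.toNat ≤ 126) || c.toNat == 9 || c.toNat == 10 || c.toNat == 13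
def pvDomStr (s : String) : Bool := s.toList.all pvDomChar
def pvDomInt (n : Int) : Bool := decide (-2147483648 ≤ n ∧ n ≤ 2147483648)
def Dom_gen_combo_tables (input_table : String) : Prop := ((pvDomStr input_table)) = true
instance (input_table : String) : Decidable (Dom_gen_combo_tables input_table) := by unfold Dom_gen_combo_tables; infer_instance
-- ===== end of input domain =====

-- B replaces the per-size itertools.combinations enumeration with a level-by-level
-- BFS over the combination tree (extend each combo by every strictly later element);
-- objective: alternative (same cost, different generation strategy).

-- ===== PORT A =====
-- hand port of itertools.combinations(xs, r) (not in PySem): exact — yields the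
-- r-subsets in lexicographic order of index tuples, elements in input order
def pyCombinations {α : Type} : List α → Nat → List (List α)
  | _, 0 => [[]]
  | [], _ + 1 => []
  | x :: rest, r + 1 => (pyCombinations rest r).map (x :: ·) ++ pyCombinations rest (r + 1)

def gen_combo_tables (input_table : String) : List (String × String) :=
  let funcs : List String := ["PROMOTE", "RENAME", "NULLABLE", "REORDER", "ADD", "DROP"]
  -- combos = list(chain.from_iterable(combinations(funcs, r) for r in range(1, len(funcs)+1)))
  let combos : List (List String) :=
    ((PySem.List.pyRange 1 (PySem.List.len funcs + 1) 1).map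
      (fun r => pyCombinations funcs r.toNat)).flatten
  -- dict comprehension with the "DROP" not in combo[:-1] filter
  let tables : PySem.Dict String String :=
    combos.foldl
      (fun d combo =>
        if "DROP" ∈ PySem.List.slice combo none (some (-1)) then d
        else d.insert (PySem.Str.join "_" combo ++ "_TABLE") input_table)
      PySem.Dict.empty
  tables.items

-- ===== PORT B =====
-- next level: extend every combo of the level by each strictly later element
-- (the inner comprehension 'for combo, last in level for j in range(last+1, len(funcs))')
def pvNext (funcs : List String) (level : List (List String × Int)) : List (List String × Int) :=
  level.flatMap
    (fun p =>
      (PySem.List.pyRange (p.2 + 1) (PySem.List.len funcs) 1).map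
        (fun j => (p.1 ++ [PySem.List.pyGetD funcs j ""], j)))

-- the while loop: each iteration inserts the current level's keys and builds the
-- next level; fuel only makes the loop total (the level empties after len(funcs)
-- rounds, so fuel = len(funcs) reaches the empty level exactly like the while test)
def pvBfsLoop (input_table : String) (funcs : List String) :
    Nat → List (List String × Int) → PySem.Dict String String → PySem.Dict String String
  | _, [], d => d
  | 0, _, d => d
  | fuel + 1, level, d =>
    let d' := level.foldl
      (fun d p =>
        if "DROP" ∈ PySem.List.slice p.1 none (some (-1)) then d
        else d.insert (PySem.Str.join "_" p.1 ++ "_TABLE") input_table) d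
    pvBfsLoop input_table funcs fuel (pvNext funcs level) d'

def gen_combo_tables_alt (input_table : String) : List (String × String) :=
  let funcs : List String := ["PROMOTE", "RENAME", "NULLABLE", "REORDER", "ADD", "DROP"]
  -- level = [((f,), i) for i, f in enumerate(funcs)]
  let level : List (List String × Int) :=
    (PySem.List.enumerate funcs).map (fun p => ([p.2], p.1))
  (pvBfsLoop input_table funcs funcs.length level PySem.Dict.empty).items

-- ===== PRECONDITION & SPEC =====
def Spec_gen_combo_tables (input_table : String) (out : List (String × String)) : Prop := out = gen_combo_tables_alt input_table
instance (input_table : String) (out : List (String × String)) : Decidable (Spec_gen_combo_tables input_table out) := by unfold Spec_gen_combo_tables; infer_instance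

-- ===== CLAIM (what is proved, stated in full; the proofs are below) =====
def Claim_equal_gen_combo_tables : Prop := ∀ (input_table : String), Dom_gen_combo_tables input_table → Spec_gen_combo_tables input_table (gen_combo_tables input_table)

-- ===== LEMMAS AND PROOFS =====
def pvFuncs : List String := ["PROMOTE", "RENAME", "NULLABLE", "REORDER", "ADD", "DROP"]

-- the dict-insertion step both programs perform per combo
def pvStep (s : String) (d : PySem.Dict String String) (combo : List String) :
    PySem.Dict String String :=
  if "DROP" ∈ PySem.List.slice combo none (some (-1)) then d
  else d.insert (PySem.Str.join "_" combo ++ "_TABLE") s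

-- the sequence of combos the BFS loop feeds to pvStep, in emission order
def pvLevels (funcs : List String) : Nat → List (List String × Int) → List (List String)
  | _, [] => []
  | 0, _ => []
  | fuel + 1, level => level.map Prod.fst ++ pvLevels funcs fuel (pvNext funcs level)

theorem pvBfsLoop_eq (s : String) (funcs : List String) :
    ∀ (fuel : Nat) (level : List (List String × Int)) (d : PySem.Dict String String),
      pvBfsLoop s funcs fuel level d = (pvLevels funcs fuel level).foldl (pvStep s) d := by
  intro fuel
  induction fuel with
  | zero =>
    intro level d
    cases level with
    | nil => simp [pvBfsLoop, pvLevels]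
    | cons h t => simp [pvBfsLoop, pvLevels]
  | succ n ih =>
    intro level d
    cases level with
    | nil => simp [pvBfsLoop, pvLevels]
    | cons h t =>
      simp only [pvBfsLoop, pvLevels, List.foldl_append, List.foldl_map, ih, pvStep]

set_option maxRecDepth 100000 in
theorem pvCombos_eq :
    pvLevels pvFuncs pvFuncs.length
        ((PySem.List.enumerate pvFuncs).map (fun p => ([p.2], p.1))) =
      ((PySem.List.pyRange 1 (PySem.List.len pvFuncs + 1) 1).map
        (fun r => pyCombinations pvFuncs r.toNat)).flatten := by
  decide

-- ===== VERDICT (by name: the statement is the Claim_ definition above) =====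
set_option maxRecDepth 100000 in
theorem gen_combo_tables_spec : Claim_equal_gen_combo_tables := by
  intro s _
  show gen_combo_tables s = gen_combo_tables_alt s
  have hA : gen_combo_tables s =
      ((((PySem.List.pyRange 1 (PySem.List.len pvFuncs + 1) 1).map
          (fun r => pyCombinations pvFuncs r.toNat)).flatten).foldl (pvStep s)
        PySem.Dict.empty).items := rfl
  have hB : gen_combo_tables_alt s =
      (pvBfsLoop s pvFuncs pvFuncs.length
        ((PySem.List.enumerate pvFuncs).map (fun p => ([p.2], p.1)))
        PySem.Dict.empty).items := rfl
  rw [hA, hB, pvBfsLoop_eq, pvCombos_eq]
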